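-- pv_equiv track=rewrite | github.com/Zarkkhan16/Smart-Code-Reviewer | smart_code_reviewer/analyzer.py | _count_lines_and_lengths
-- ===== SOURCE A (Python) =====
-- MAX_LINE_LENGTH = 100
--
-- def _count_lines_and_lengths(source: str) -> tuple[int, int, int, int, int]:
--     """Returns (total, comment, blank, max_line_len, long_line_count)."""
--     lines = source.splitlines()
--     total = len(lines)
--     comment = 0
--     blank = 0
--     max_len = 0
--     long_count = 0
--     for line in lines:
--         s = line.strip()
--         if not s:
--             blank += 1
--         elif s.startswith("#") or (s.startswith("//") or s.startswith("/*") or s.startswith("*")):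
--             comment += 1
--         length = len(line)
--         if length > max_len:
--             max_len = length
--         if length > MAX_LINE_LENGTH:
--             long_count += 1
--     return total, comment, blank, max_len, long_count
-- ===== SOURCE B (Python) =====
-- MAX_LINE_LENGTH = 100
--
-- def _count_lines_and_lengths(source: str) -> tuple[int, int, int, int, int]:
--     """Returns (total, comment, blank, max_line_len, long_line_count)."""
--     lines = source.splitlines()
--     stripped = [l.strip() for l in lines]
--     blank = sum(1 for s in stripped if not s)
--     comment = sum(
--         1
--         for s in stripped
--         if s and (s.startswith("#") or s.startswith("//")
--                   or s.startswith("/*") or s.startswith("*"))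
--     )
--     max_len = max((len(l) for l in lines), default=0)
--     long_count = sum(1 for l in lines if len(l) > MAX_LINE_LENGTH)
--     return len(lines), comment, blank, max_len, long_count
-- ===== Notes on version B (the rewrite author's own statement) =====
-- stated objective: simpler
-- what changed: A's single fused loop carrying five counters is decomposed into independent passes: a stripped-lines map, three count-sums (blank, comment, long lines) and max(..., default=0) for the longest line.
import Mathlib
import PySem

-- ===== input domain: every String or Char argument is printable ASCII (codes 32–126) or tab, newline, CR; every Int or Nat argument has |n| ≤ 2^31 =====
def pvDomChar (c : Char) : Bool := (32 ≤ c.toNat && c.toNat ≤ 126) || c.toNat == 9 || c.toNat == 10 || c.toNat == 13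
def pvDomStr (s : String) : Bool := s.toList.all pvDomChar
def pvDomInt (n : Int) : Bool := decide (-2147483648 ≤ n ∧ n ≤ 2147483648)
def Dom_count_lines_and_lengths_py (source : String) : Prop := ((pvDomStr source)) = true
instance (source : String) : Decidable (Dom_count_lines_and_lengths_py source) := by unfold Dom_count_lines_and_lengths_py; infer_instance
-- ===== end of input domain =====

-- B replaces A's single fused 5-counter loop by independent passes (a stripped-lines map,
-- three count passes, max with default 0); objective: simpler decomposition, same cost.

-- ===== PORT A =====
-- the body of A's for-loop: state = (comment, blank, max_len, long_count)
def pvStepA (acc : Int × Int × Int × Int) (line : String) : Int × Int × Int × Int :=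
  let s := PySem.Str.strip line
  let (comment, blank) :=
    if PySem.Str.len s == 0 then (acc.1, acc.2.1 + 1)
    else if PySem.Str.startswith s "#" || (PySem.Str.startswith s "//" ||
           PySem.Str.startswith s "/*" || PySem.Str.startswith s "*") then
      (acc.1 + 1, acc.2.1)
    else (acc.1, acc.2.1)
  let length := PySem.Str.len line
  let maxLen := if length > acc.2.2.1 then length else acc.2.2.1
  let longCount := if length > 100 then acc.2.2.2 + 1 else acc.2.2.2
  (comment, blank, maxLen, longCount)

-- literal transliteration of A's fused loop
def count_lines_and_lengths_py (source : String) : Int × Int × Int × Int × Int :=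
  let lines := PySem.Str.splitlines source
  let st : Int × Int × Int × Int := lines.foldl pvStepA (0, 0, 0, 0)
  ((lines.length : Int), st.1, st.2.1, st.2.2.1, st.2.2.2)

-- ===== PORT B =====
def count_lines_and_lengths_py_alt (source : String) : Int × Int × Int × Int × Int :=
  let lines := PySem.Str.splitlines source
  let stripped := lines.map PySem.Str.strip
  let blank : Int := (stripped.countP (fun s => PySem.Str.len s == 0) : Int)
  let comment : Int := (stripped.countP (fun s =>
      !(PySem.Str.len s == 0) && (PySem.Str.startswith s "#" || PySem.Str.startswith s "//" ||
        PySem.Str.startswith s "/*" || PySem.Str.startswith s "*")) : Int)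
  let maxLen : Int := (PySem.List.max? (lines.map PySem.Str.len) (fun x => x)).getD 0
  let longCount : Int := (lines.countP (fun l => PySem.Str.len l > 100) : Int)
  ((lines.length : Int), comment, blank, maxLen, longCount)

-- ===== PRECONDITION & SPEC =====
def Spec_count_lines_and_lengths_py (source : String) (out : Int × Int × Int × Int × Int) : Prop := out = count_lines_and_lengths_py_alt source
instance (source : String) (out : Int × Int × Int × Int × Int) : Decidable (Spec_count_lines_and_lengths_py source out) := by unfold Spec_count_lines_and_lengths_py; infer_instance

-- ===== CLAIM (what is proved, stated in full; the proofs are below) =====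
def Claim_equal_count_lines_and_lengths_py : Prop := ∀ (source : String), Dom_count_lines_and_lengths_py source → Spec_count_lines_and_lengths_py source (count_lines_and_lengths_py source)

-- ===== LEMMAS AND PROOFS =====

-- Any fold whose step is "blank += [pB], comment += [¬pB ∧ pC], running max of f, long += [pL]"
-- computes the three counts and the running max independently.
theorem pv_fold_abs {α : Type} (pB pC pL : α → Bool) (f : α → Int)
    (g : (Int × Int × Int × Int) → α → Int × Int × Int × Int)
    (hg : ∀ acc x, g acc x =
      (acc.1 + (if !pB x && pC x then 1 else 0),
       acc.2.1 + (if pB x then 1 else 0),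
       max acc.2.2.1 (f x),
       acc.2.2.2 + (if pL x then 1 else 0)))
    (lines : List α) (c b m lc : Int) :
    lines.foldl g (c, b, m, lc)
      = (c + (lines.countP (fun x => !pB x && pC x) : Int),
         b + (lines.countP pB : Int),
         (lines.map f).foldl max m,
         lc + (lines.countP pL : Int)) := by
  induction lines generalizing c b m lc with
  | nil => simp
  | cons x t ih =>
    simp only [List.foldl_cons, List.map_cons, List.countP_cons, hg]
    rw [ih]
    simp only [Prod.mk.injEq]
    refine ⟨?_, ?_, trivial, ?_⟩ <;> push_cast <;> split_ifs <;> omega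

-- A's step function has exactly that shape.
theorem pv_stepA_eq (acc : Int × Int × Int × Int) (line : String) :
    pvStepA acc line
    = (acc.1 + (if !(PySem.Str.len (PySem.Str.strip line) == 0) &&
          (PySem.Str.startswith (PySem.Str.strip line) "#" ||
           (PySem.Str.startswith (PySem.Str.strip line) "//" ||
            PySem.Str.startswith (PySem.Str.strip line) "/*" ||
            PySem.Str.startswith (PySem.Str.strip line) "*")) then 1 else 0),
       acc.2.1 + (if PySem.Str.len (PySem.Str.strip line) == 0 then 1 else 0),
       max acc.2.2.1 (PySem.Str.len line),
       acc.2.2.2 + (if decide (PySem.Str.len line > 100) = true then 1 else 0)) := by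
  unfold pvStepA
  dsimp only
  split_ifs <;> simp_all <;> omega

-- B's max-with-default equals a running max started at 0, because lengths are nonnegative.
theorem pv_max_default (lines : List String) :
    (PySem.List.max? (lines.map PySem.Str.len) (fun x => x)).getD 0
      = (lines.map PySem.Str.len).foldl max 0 := by
  cases h : lines.map PySem.Str.len with
  | nil => simp [PySem.List.max?]
  | cons y t =>
    rw [PySem.List.max?_id_cons]
    have hy : (0 : Int) ≤ y := by
      have hmem : y ∈ lines.map PySem.Str.len := h ▸ List.mem_cons_self
      obtain ⟨l, _, rfl⟩ := List.mem_map.mp hmem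
      simp [PySem.Str.len_eq]
    simp only [List.foldl_cons, Option.getD_some, max_eq_right hy]

-- ===== VERDICT (by name: the statement is the Claim_ definition above) =====
set_option maxHeartbeats 1000000 in
theorem count_lines_and_lengths_py_spec : Claim_equal_count_lines_and_lengths_py := by
  intro source _
  unfold Spec_count_lines_and_lengths_py count_lines_and_lengths_py count_lines_and_lengths_py_alt
  dsimp only
  rw [pv_fold_abs
        (fun l => PySem.Str.len (PySem.Str.strip l) == 0)
        (fun l => PySem.Str.startswith (PySem.Str.strip l) "#" ||
          (PySem.Str.startswith (PySem.Str.strip l) "//" ||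
           PySem.Str.startswith (PySem.Str.strip l) "/*" ||
           PySem.Str.startswith (PySem.Str.strip l) "*"))
        (fun l => PySem.Str.len l > 100)
        PySem.Str.len pvStepA pv_stepA_eq, pv_max_default]
  simp only [List.countP_map, Function.comp_def, zero_add, Bool.or_assoc]
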